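-- pv_equiv track=rewrite | github.com/whyj107/Algorithm | CodeWar/20201022_Loneliest character.py | loneliest
-- ===== SOURCE A (Python) =====
-- def loneliest(strng):
--     strng = strng.lstrip().rstrip()
--     d = {}
--     pre, l, r = strng[0], 0, 0
--     for i in range(1, len(strng)):
--         if strng[i] == ' ':
--             r += 1
--         else:
--             if not d.get(l+r):
--                 d[l+r] = []
--             d[l+r].append(pre)
--             l, r, pre = r, 0, strng[i]
--
--     if not d.get(l + r):
--         d[l + r] = []
--     d[l + r].append(pre)
--     return d[max(d.keys())]
-- ===== SOURCE B (Python) =====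
-- def loneliest(strng):
--     s = strng.strip()
--     # tokenize: the non-space characters in order, and each one's run of ' ' to its left
--     chars, lefts, run = [], [], 0
--     for ch in s:
--         if ch == ' ':
--             run += 1
--         else:
--             chars.append(ch)
--             lefts.append(run)
--             run = 0
--     # loneliness of char i = spaces to its left + spaces to its right
--     rights = lefts[1:] + [run]
--     scores = [a + b for a, b in zip(lefts, rights)]
--     m = max(scores)
--     return [c for c, sc in zip(chars, scores) if sc == m]
-- ===== Notes on version B (the rewrite author's own statement) =====
-- stated objective: alternative
-- what changed: A makes one pass that groups characters into a dict keyed by their loneliness score and returns the bucket of the max key; B instead tokenizes the stripped string into its non-space characters plus each one's left run of spaces, scores each character as left run + right run, and max-filters that flat score list.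
import Mathlib
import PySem

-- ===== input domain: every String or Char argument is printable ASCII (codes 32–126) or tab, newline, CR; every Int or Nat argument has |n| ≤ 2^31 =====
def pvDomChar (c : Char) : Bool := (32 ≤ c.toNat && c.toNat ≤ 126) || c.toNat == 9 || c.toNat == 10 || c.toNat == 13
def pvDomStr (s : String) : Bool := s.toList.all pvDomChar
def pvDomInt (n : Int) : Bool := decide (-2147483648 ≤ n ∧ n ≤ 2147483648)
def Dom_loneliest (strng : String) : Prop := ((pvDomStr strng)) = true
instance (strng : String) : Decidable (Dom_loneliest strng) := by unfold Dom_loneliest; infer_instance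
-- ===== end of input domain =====

-- B re-implements A by a different decomposition: tokenize the stripped string into non-space
-- characters plus each one's left run of spaces, score each character as left+right run, then
-- max-filter — instead of A's single pass grouping characters into a dict keyed by score.

-- ===== PORT A =====
-- one iteration of A's for-loop; state = (d, pre, l, r)
def loneliestStep : (PySem.Dict Int (List String) × Char × Int × Int) → Char →
    (PySem.Dict Int (List String) × Char × Int × Int)
  | (d, pre, l, r), c =>
    if c = ' ' then (d, pre, l, r + 1)
    else
      let d1 := if (d.get? (l + r)).getD [] = [] then d.insert (l + r) ([] : List String) else d
      let d2 := d1.modify (l + r) [] (fun xs => xs ++ [String.mk [pre]])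
      (d2, c, r, 0)

-- A's code after the loop: the final append of `pre` at key l+r, then d[max(d.keys())]
def loneliestFinish : (PySem.Dict Int (List String) × Char × Int × Int) → List String
  | (d, pre, l, r) =>
    let d1 := if (d.get? (l + r)).getD [] = [] then d.insert (l + r) ([] : List String) else d
    let d2 := d1.modify (l + r) [] (fun xs => xs ++ [String.mk [pre]])
    match PySem.List.max? d2.keys (fun k => k) with
    | some m => d2.getD m []
    | none => []          -- unreachable: d2 always contains key l+r

def loneliest (strng : String) : List String :=
  match (PySem.Str.rstrip (PySem.Str.lstrip strng)).toList with
  | [] => []              -- Python raises IndexError on strng[0] here; excluded by Pre_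
  | c0 :: rest => loneliestFinish (rest.foldl loneliestStep (PySem.Dict.empty, c0, 0, 0))

-- ===== PORT B =====
-- one iteration of B's tokenizing loop; state = (chars, lefts, run)
def tokStep : (List Char × List Int × Int) → Char → (List Char × List Int × Int)
  | (chars, lefts, run), c =>
    if c = ' ' then (chars, lefts, run + 1)
    else (chars ++ [c], lefts ++ [run], 0)

-- B's code after the loop: rights, scores, max, filter
def tokFinish : (List Char × List Int × Int) → List String
  | (chars, lefts, run) =>
    let rights := lefts.tail ++ [run]
    let scores := List.zipWith (fun a b => a + b) lefts rights
    match PySem.List.max? scores (fun k => k) with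
    | some m => (chars.zip scores).filterMap
        (fun p => if p.2 = m then some (String.mk [p.1]) else none)
    | none => []          -- Python raises ValueError on max([]) here; excluded by Pre_

def loneliest_alt (strng : String) : List String :=
  tokFinish ((PySem.Str.strip strng).toList.foldl tokStep ([], [], 0))

-- ===== PRECONDITION & SPEC =====
-- Pre_ excludes exactly the strings that strip to empty: there A raises IndexError
-- (indexing the stripped string at 0) and B raises ValueError (max of an empty list).
def Pre_loneliest (strng : String) : Prop := PySem.Str.strip strng ≠ ""
instance (strng : String) : Decidable (Pre_loneliest strng) := by unfold Pre_loneliest; infer_instance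

def pvWitness_loneliest : String := "a  b c"

def Spec_loneliest (strng : String) (out : List String) : Prop := out = loneliest_alt strng
instance (strng : String) (out : List String) : Decidable (Spec_loneliest strng out) := by unfold Spec_loneliest; infer_instance

-- ===== CLAIM (what is proved, stated in full; the proofs are below) =====
def Claim_equal_loneliest : Prop := ∀ (strng : String), Dom_loneliest strng → Pre_loneliest strng → Spec_loneliest strng (loneliest strng)

-- ===== LEMMAS AND PROOFS =====

-- the characters of `chars` whose paired score equals k, as 1-char strings, in order
def pick (chars : List Char) (scores : List Int) (k : Int) : List String :=
  (chars.zip scores).filterMap (fun p => if p.2 = k then some (String.mk [p.1]) else none)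

-- scores of the already-committed characters: sums of adjacent left-gaps
def cScores : List Int → List Int
  | [] => []
  | [_] => []
  | a :: b :: t => (a + b) :: cScores (b :: t)

lemma length_cScores : ∀ xs : List Int, (cScores xs).length = xs.length - 1 := by
  intro xs
  match xs with
  | [] => simp [cScores]
  | [_] => simp [cScores]
  | a :: b :: t => simp [cScores, length_cScores (b :: t)]

lemma cScores_append (xs : List Int) (l r : Int) :
    cScores (xs ++ [l] ++ [r]) = cScores (xs ++ [l]) ++ [l + r] := by
  induction xs with
  | nil => simp [cScores]
  | cons a xs ih =>
    cases xs with
    | nil => simp [cScores]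
    | cons b xs' => simpa [cScores] using ih

lemma scores_eq (xs : List Int) (l r : Int) :
    List.zipWith (fun a b => a + b) (xs ++ [l]) ((xs ++ [l]).tail ++ [r])
      = cScores (xs ++ [l]) ++ [l + r] := by
  induction xs with
  | nil => simp [cScores]
  | cons a xs ih =>
    cases xs with
    | nil => simp [cScores]
    | cons b xs' => simpa [cScores] using ih

lemma pick_append (xs ys : List Char) (s1 s2 : List Int) (k : Int)
    (h : xs.length = s1.length) :
    pick (xs ++ ys) (s1 ++ s2) k = pick xs s1 k ++ pick ys s2 k := by
  unfold pick
  rw [List.zip_append h, List.filterMap_append]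

lemma pick_single (c : Char) (K k : Int) :
    pick [c] [K] k = if k = K then [String.mk [c]] else [] := by
  by_cases h : k = K <;> simp [pick, h] <;> omega

lemma step_getD (d : PySem.Dict Int (List String)) (K : Int) (x : String) (k : Int) :
    (((if (d.get? K).getD [] = [] then d.insert K ([] : List String) else d)).modify K []
        (fun xs => xs ++ [x])).getD k []
      = if k = K then d.getD K [] ++ [x] else d.getD k [] := by
  by_cases hg : (d.get? K).getD ([] : List String) = []
  · have hd : d.getD K [] = [] := by rw [PySem.Dict.getD_eq_get?_getD]; exact hg
    rw [if_pos hg]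
    by_cases hk : k = K <;>
      simp [hk, PySem.Dict.getD_modify, PySem.Dict.getD_insert, hd]
  · rw [if_neg hg, PySem.Dict.getD_modify]

lemma step_mem_keys (d : PySem.Dict Int (List String)) (K : Int) (x : String) (k : Int) :
    k ∈ (((if (d.get? K).getD [] = [] then d.insert K ([] : List String) else d)).modify K []
        (fun xs => xs ++ [x])).keys ↔ k = K ∨ k ∈ d.keys := by
  by_cases hg : (d.get? K).getD ([] : List String) = []
  · rw [if_pos hg]
    rw [PySem.Dict.keys_modify, PySem.Dict.mem_keys_insert, PySem.Dict.mem_keys_insert]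
    tauto
  · rw [if_neg hg, PySem.Dict.keys_modify, PySem.Dict.mem_keys_insert]

lemma max?_id_congr (xs ys : List Int) (h : ∀ k, k ∈ xs ↔ k ∈ ys) :
    PySem.List.max? xs (fun k => k) = PySem.List.max? ys (fun k => k) := by
  cases hx : PySem.List.max? xs (fun k => k) with
  | none =>
    rw [PySem.List.max?_eq_none_iff] at hx
    subst hx
    have hy : ys = [] := by
      apply List.eq_nil_iff_forall_not_mem.2
      intro a ha
      have := (h a).mpr ha
      simp at this
    rw [hy]
    exact ((PySem.List.max?_eq_none_iff [] _).mpr rfl).symm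
  | some m =>
    have hm : m ∈ ys := (h m).1 (PySem.List.max?_mem hx)
    cases hy : PySem.List.max? ys (fun k => k) with
    | none => rw [PySem.List.max?_eq_none_iff] at hy; subst hy; simp at hm
    | some m' =>
      have hm' : m' ∈ xs := (h m').2 (PySem.List.max?_mem hy)
      have h1 : m ≤ m' := PySem.List.max?_isMax hy m hm
      have h2 : m' ≤ m := PySem.List.max?_isMax hx m' hm'
      rw [le_antisymm h1 h2]

lemma dropWhile_head_not {p : Char → Bool} : ∀ (s : List Char) {c : Char} {t : List Char},
    s.dropWhile p = c :: t → p c = false := by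
  intro s
  induction s with
  | nil => intro c t h; simp [List.dropWhile] at h
  | cons a s ih =>
    intro c t h
    by_cases ha : p a
    · rw [List.dropWhile_cons_of_pos ha] at h; exact ih h
    · rw [List.dropWhile_cons_of_neg ha] at h
      cases h; simpa using ha

lemma strip_head_ne_space (s : List Char) (c : Char) (t : List Char)
    (h : PySem.Chars.strip s = c :: t) : c ≠ ' ' := by
  have hpre : (c :: t) <+: PySem.Chars.lstrip s := by
    rw [← h]
    unfold PySem.Chars.strip PySem.Chars.rstrip
    rw [← List.reverse_suffix]
    simpa using List.dropWhile_suffix _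
  obtain ⟨r, hr⟩ := hpre
  have hls : PySem.Chars.lstrip s = c :: (t ++ r) := by simpa using hr.symm
  have hsp : PySem.Chars.isspace c = false := dropWhile_head_not s hls
  intro hc; subst hc; simp [PySem.Chars.isspace] at hsp

-- the loop invariant: after both loops have consumed the same characters, A's dict groups
-- exactly the committed characters (cmt) by their committed scores (cScores (ys ++ [l]))
lemma main_inv (t : List Char) :
    ∀ (d : PySem.Dict Int (List String)) (cmt : List Char) (ys : List Int)
      (pre : Char) (l r : Int),
      cmt.length = ys.length →
      (∀ k, d.getD k [] = pick cmt (cScores (ys ++ [l])) k) →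
      (∀ k, k ∈ d.keys ↔ k ∈ cScores (ys ++ [l])) →
      loneliestFinish (t.foldl loneliestStep (d, pre, l, r))
        = tokFinish (t.foldl tokStep (cmt ++ [pre], ys ++ [l], r)) := by
  induction t with
  | nil =>
    intro d cmt ys pre l r hlen hget hkeys
    simp only [List.foldl_nil]
    have hlen2 : cmt.length = (cScores (ys ++ [l])).length := by
      rw [length_cScores]; simp [hlen]
    have hA : ∀ k,
        (((if (d.get? (l + r)).getD [] = [] then d.insert (l + r) ([] : List String) else d)).modify (l + r) []
          (fun xs => xs ++ [String.mk [pre]])).getD k []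
        = pick (cmt ++ [pre]) (cScores (ys ++ [l]) ++ [l + r]) k := by
      intro k
      rw [step_getD, pick_append _ _ _ _ _ hlen2, pick_single, hget k]
      by_cases hk : k = l + r <;> simp [hk, hget]
    have hKeys : ∀ k,
        k ∈ (((if (d.get? (l + r)).getD [] = [] then d.insert (l + r) ([] : List String) else d)).modify (l + r) []
          (fun xs => xs ++ [String.mk [pre]])).keys ↔ k ∈ cScores (ys ++ [l]) ++ [l + r] := by
      intro k
      rw [step_mem_keys, List.mem_append, List.mem_singleton, hkeys k]
      tauto
    have hmax :
        PySem.List.max? (((if (d.get? (l + r)).getD [] = [] then d.insert (l + r) ([] : List String) else d)).modify (l + r) []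
          (fun xs => xs ++ [String.mk [pre]])).keys (fun k => k)
        = PySem.List.max? (cScores (ys ++ [l]) ++ [l + r]) (fun k => k) :=
      max?_id_congr _ _ hKeys
    show loneliestFinish (d, pre, l, r) = tokFinish (cmt ++ [pre], ys ++ [l], r)
    rw [loneliestFinish, tokFinish]
    simp only [scores_eq, hmax]
    cases PySem.List.max? (cScores (ys ++ [l]) ++ [l + r]) (fun k => k) with
    | none => rfl
    | some m => exact hA m
  | cons c t ih =>
    intro d cmt ys pre l r hlen hget hkeys
    simp only [List.foldl_cons]
    by_cases hc : c = ' '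
    · rw [show loneliestStep (d, pre, l, r) c = (d, pre, l, r + 1) from by
          simp [loneliestStep, hc],
        show tokStep (cmt ++ [pre], ys ++ [l], r) c = (cmt ++ [pre], ys ++ [l], r + 1) from by
          simp [tokStep, hc]]
      exact ih d cmt ys pre l (r + 1) hlen hget hkeys
    · rw [show loneliestStep (d, pre, l, r) c
          = (((if (d.get? (l + r)).getD [] = [] then d.insert (l + r) ([] : List String) else d)).modify (l + r) []
              (fun xs => xs ++ [String.mk [pre]]), c, r, 0) from by
          simp [loneliestStep, hc],
        show tokStep (cmt ++ [pre], ys ++ [l], r) c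
          = ((cmt ++ [pre]) ++ [c], (ys ++ [l]) ++ [r], 0) from by
          simp [tokStep, hc]]
      have hlen2 : cmt.length = (cScores (ys ++ [l])).length := by
        rw [length_cScores]; simp [hlen]
      exact ih _ (cmt ++ [pre]) (ys ++ [l]) c r 0
        (by simp [hlen])
        (by
          intro k
          rw [cScores_append, pick_append _ _ _ _ _ hlen2, pick_single, step_getD, hget k]
          by_cases hk : k = l + r <;> simp [hk, hget])
        (by
          intro k
          rw [cScores_append, step_mem_keys, List.mem_append, List.mem_singleton, hkeys k]
          tauto)

lemma loneliest_eq (strng : String) (hpre : Pre_loneliest strng) :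
    loneliest strng = loneliest_alt strng := by
  unfold loneliest loneliest_alt Pre_loneliest at *
  have hs : (PySem.Str.rstrip (PySem.Str.lstrip strng)).toList = (PySem.Str.strip strng).toList := by
    simp [PySem.Str.toList_rstrip, PySem.Str.toList_lstrip, PySem.Str.toList_strip, PySem.Chars.strip]
  rw [hs]
  cases hcase : (PySem.Str.strip strng).toList with
  | nil =>
    exfalso
    apply hpre
    have : (PySem.Str.strip strng).toList = "".toList := by simpa using hcase
    exact String.toList_injective this
  | cons c0 rest =>
    have hc0 : c0 ≠ ' ' := strip_head_ne_space strng.toList c0 rest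
      (by rw [← PySem.Str.toList_strip]; exact hcase)
    rw [List.foldl_cons, show tokStep ([], [], 0) c0 = ([c0], [0], 0) from by
        simp [tokStep, hc0]]
    have := main_inv rest PySem.Dict.empty [] [] c0 0 0 (by simp)
      (fun k => by simp [PySem.Dict.getD_empty, pick, cScores])
      (fun k => by simp [PySem.Dict.keys_empty, cScores])
    simpa using this

-- ===== VERDICT (by name: the statement is the Claim_ definition above) =====
theorem loneliest_spec : Claim_equal_loneliest := by
  unfold Claim_equal_loneliest Spec_loneliest
  intro strng _ hpre
  exact loneliest_eq strng hpre
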